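-- pv_equiv track=rewrite | github.com/L-cloud/coding_test | programmers/2019_kakao_internship_징검다리건너기.py | solution
-- ===== SOURCE A (Python) =====
-- def solution(stones, k):
--     start , end = 0 , max(stones)
--     mid = (start + end) // 2
--     big = False # 건너버린 인원이 더 큰가
--     while start <= end:
--         tempt = [i - mid for i in stones]
--         chance = k
--         big = False
--         for s in tempt:
--             if s < 0:
--                 chance -= 1
--             else:
--                 chance = k
--             if chance <= 0:
--                 big = True
--                 break
--         if big:
--             end = mid - 1
--         else: # 실제 건널 수 있는 것보다 적게 건넘
--             start = mid + 1
--         mid = (start + end) // 2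
--     return mid
-- ===== SOURCE B (Python) =====
-- def solution(stones, k):
--     hi = max(stones)
--     n = len(stones)
--     if k <= 0:
--         return -1            # no positive jump: nothing crosses at any level
--     if k > n:
--         return hi            # every stone can be jumped over; the best stone bounds the search
--     pre = []                 # pre[j] = max of stones over j's k-block up to j
--     for j, s in enumerate(stones):
--         pre.append(s if j % k == 0 else max(pre[-1], s))
--     suf = [0] * n            # suf[j] = max of stones from j to the end of j's k-block
--     for j in range(n - 1, -1, -1):
--         s = stones[j]
--         suf[j] = s if j % k == k - 1 or j == n - 1 else max(suf[j + 1], s)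
--     best = min(max(suf[i], pre[i + k - 1]) for i in range(n - k + 1))
--     return max(-1, best)     # -1 = the 'nothing crosses' floor of the searched level range
-- ===== Notes on version B (the rewrite author's own statement) =====
-- stated objective: faster
-- what changed: Replaces A's binary search over [0, max(stones)] (each probe rescanning all stones with a consecutive-failure counter) by a direct O(n) block-decomposition sliding-window maximum: prefix and suffix maxima of k-aligned blocks give each window's maximum, and the answer is the minimum window maximum (clamped to A's -1 'nothing crosses' floor; degenerate k handled by two early returns).
-- intended difference: On all-negative stone lists (max <= -3, or max = -2 with k > len(stones)) A's while loop never runs and it returns the accidental precomputed midpoint max(stones)//2, while B returns the value consistent with its stated contract (-1 'nothing crosses', or max(stones) when k clears the whole list) - an equally valid choice on this unspecified, degenerate corner. — e.g. on solution([-4], 1): A returns -2, B returns -1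
import Mathlib
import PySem

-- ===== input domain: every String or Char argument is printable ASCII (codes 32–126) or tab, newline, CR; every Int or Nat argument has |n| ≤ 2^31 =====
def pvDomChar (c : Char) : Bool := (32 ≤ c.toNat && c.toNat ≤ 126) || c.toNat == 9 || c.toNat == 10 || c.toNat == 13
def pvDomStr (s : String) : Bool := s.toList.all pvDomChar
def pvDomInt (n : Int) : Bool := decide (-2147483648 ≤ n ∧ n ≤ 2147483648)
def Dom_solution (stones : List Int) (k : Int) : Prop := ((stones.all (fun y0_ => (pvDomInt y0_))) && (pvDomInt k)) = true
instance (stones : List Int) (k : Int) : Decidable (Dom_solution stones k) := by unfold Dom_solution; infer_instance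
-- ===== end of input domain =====

-- B replaces A's binary search over [0, max(stones)] (each probe rescanning all stones) by a
-- single-pass block-decomposition sliding-window maximum; objective: faster (O(n) vs O(n log max)).


-- ===== PORT A =====
-- inner 'for s in tempt' loop with its break (chance counter)
def pvInner (k : Int) : List Int → Int → Bool
  | [], _ => false
  | s :: rest, chance =>
    let c := if s < 0 then chance - 1 else k
    if c ≤ 0 then true else pvInner k rest c

-- the 'while start <= end' binary-search loop; returns (start+end)//2 on exit, as A does
def pvSearch (stones : List Int) (k : Int) (start stop : Int) : Int :=
  if h : start ≤ stop then
    let mid := PySem.Int.floordiv (start + stop) 2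
    if pvInner k (stones.map (fun i => i - mid)) k then
      pvSearch stones k start (mid - 1)
    else
      pvSearch stones k (mid + 1) stop
  else
    PySem.Int.floordiv (start + stop) 2
termination_by (stop - start + 1).toNat
decreasing_by
  · have := PySem.Int.floordiv_two_mid_bounds h; omega
  · have := PySem.Int.floordiv_two_mid_bounds h; omega

def solution (stones : List Int) (k : Int) : Int :=
  pvSearch stones k 0 ((PySem.List.max? stones (fun y => y)).getD 0)

-- ===== PORT B =====
def solution_alt (stones : List Int) (k : Int) : Int :=
  let hi := (PySem.List.max? stones (fun y => y)).getD 0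
  let n : Int := stones.length
  if k ≤ 0 then -1
  else if k > n then hi
  else
    let pre := (PySem.List.enumerate stones 0).foldl
      (fun acc js =>
        acc ++ [if PySem.Int.mod js.1 k == 0 then js.2
                else max (PySem.List.pyGetD acc (-1) 0) js.2]) []
    let suf := (PySem.List.pyRange (n - 1) (-1) (-1)).foldl
      (fun acc j =>
        let s := PySem.List.pyGetD stones j 0
        PySem.List.pySetD acc j
          (if PySem.Int.mod j k == k - 1 || j == n - 1 then s
           else max (PySem.List.pyGetD acc (j + 1) 0) s))
      (List.replicate stones.length 0)
    let best := ((PySem.List.min? ((PySem.List.pyRange 0 (n - k + 1) 1).map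
        (fun i => max (PySem.List.pyGetD suf i 0) (PySem.List.pyGetD pre (i + k - 1) 0)))
        (fun y => y)).getD 0)
    max (-1) best

-- ===== PRECONDITION & SPEC =====
-- Pre_ excludes only the empty list, on which A's max(stones) raises ValueError.
def Pre_solution (stones : List Int) (k : Int) : Prop := stones ≠ []
instance (stones : List Int) (k : Int) : Decidable (Pre_solution stones k) := by
  unfold Pre_solution; infer_instance

def pvWitness_solution : List Int × Int := ([2, 4, 5, 3, 2, 1, 4, 2, 5, 1], 3)

-- On all-negative stone lists (max <= -3, or max = -2 with k > len(stones)) A's while loop never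
-- runs and it returns the accidental precomputed midpoint max(stones)//2, while B returns the value
-- consistent with its stated contract (-1 'nothing crosses', or max(stones) when k clears the whole
-- list) — an equally valid choice on this unspecified, degenerate corner.
def D_solution (stones : List Int) (k : Int) : Prop :=
  stones ≠ [] ∧ ((∀ s ∈ stones, s ≤ -3) ∨
    ((∀ s ∈ stones, s ≤ -2) ∧ (-2:Int) ∈ stones ∧ k > stones.length))
instance (stones : List Int) (k : Int) : Decidable (D_solution stones k) := by
  unfold D_solution; infer_instance

def Spec_solution (stones : List Int) (k : Int) (out : Int) : Prop := ¬ D_solution stones k → out = solution_alt stones k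
instance (stones : List Int) (k : Int) (out : Int) : Decidable (Spec_solution stones k out) := by unfold Spec_solution; infer_instance

def pvDiffWitness_solution : List Int × Int := ([-4], 1)
def pvDiffWitnessOut_solution : Int × Int := (-2, -1)

-- ===== CLAIM (what is proved, stated in full; the proofs are below) =====
def Claim_unchanged_solution : Prop := ∀ (stones : List Int) (k : Int), Dom_solution stones k → Pre_solution stones k → Spec_solution stones k (solution stones k)
def Claim_changed_solution : Prop := Dom_solution (pvDiffWitness_solution.1) (pvDiffWitness_solution.2) ∧ Pre_solution (pvDiffWitness_solution.1) (pvDiffWitness_solution.2) ∧ D_solution (pvDiffWitness_solution.1) (pvDiffWitness_solution.2) ∧ solution (pvDiffWitness_solution.1) (pvDiffWitness_solution.2) = pvDiffWitnessOut_solution.1 ∧ solution_alt (pvDiffWitness_solution.1) (pvDiffWitness_solution.2) = pvDiffWitnessOut_solution.2 ∧ pvDiffWitnessOut_solution.1 ≠ pvDiffWitnessOut_solution.2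
def Claim_exact_solution : Prop := ∀ (stones : List Int) (k : Int), Dom_solution stones k → Pre_solution stones k → D_solution stones k → solution stones k ≠ solution_alt stones k

-- ===== LEMMAS AND PROOFS =====

-- j-th stone (0 when out of range; every use is in range)
def pvG (st : List Int) (j : Nat) : Int := st.getD j 0

-- max of stones over the index interval [a, a+t]
def pvIMax (st : List Int) (a : Nat) : Nat → Int
  | 0 => pvG st a
  | t+1 => max (pvIMax st a t) (pvG st (a+t+1))

-- "K consecutive stones all below x" — the predicate A's inner loop decides
def pvBig (st : List Int) (K : Nat) (x : Int) : Prop :=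
  ∃ i, i + K ≤ st.length ∧ ∀ j, j < K → pvG st (i+j) < x

lemma pvG_le_pvIMax (st : List Int) (a t j : Nat) (h : j ≤ t) :
    pvG st (a+j) ≤ pvIMax st a t := by
  induction t with
  | zero =>
    have hj : j = 0 := by omega
    subst hj; simp [pvIMax]
  | succ t ih =>
    have he : pvIMax st a (t+1) = max (pvIMax st a t) (pvG st (a+t+1)) := rfl
    rw [he]
    by_cases hj : j ≤ t
    · exact le_sup_of_le_left (ih hj)
    · have hj' : j = t+1 := by omega
      subst hj'
      have hidx : a+(t+1) = a+t+1 := by omega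
      rw [hidx]
      exact le_sup_of_le_right le_rfl

lemma pvIMax_mem (st : List Int) (a t : Nat) : ∃ j, j ≤ t ∧ pvIMax st a t = pvG st (a+j) := by
  induction t with
  | zero => exact ⟨0, le_refl 0, rfl⟩
  | succ t ih =>
    obtain ⟨j, hj, he⟩ := ih
    have heq : pvIMax st a (t+1) = max (pvIMax st a t) (pvG st (a+t+1)) := rfl
    rw [heq]
    rcases max_choice (pvIMax st a t) (pvG st (a+t+1)) with h | h
    · exact ⟨j, by omega, by rw [h, he]⟩
    · exact ⟨t+1, le_refl _, by rw [h]; exact congrArg (pvG st) (by omega)⟩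

lemma pvIMax_cons (st : List Int) (a : Nat) : ∀ t, pvIMax st a (t+1) = max (pvG st a) (pvIMax st (a+1) t) := by
  intro t
  induction t with
  | zero => simp [pvIMax]
  | succ t ih =>
    have l1 : pvIMax st a (t+1+1) = max (pvIMax st a (t+1)) (pvG st (a+(t+1)+1)) := rfl
    have l2 : pvIMax st (a+1) (t+1) = max (pvIMax st (a+1) t) (pvG st ((a+1)+t+1)) := rfl
    rw [l1, ih, max_assoc, l2, show a+(t+1)+1 = a+1+t+1 by omega]

lemma pvIMax_pos (st : List Int) (a u : Nat) (h : 0 < u) :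
    pvIMax st a u = max (pvIMax st a (u-1)) (pvG st (a+u)) := by
  obtain ⟨v, rfl⟩ : ∃ v, u = v+1 := ⟨u-1, by omega⟩
  rfl

lemma pvIMax_union (st : List Int) {a t c u w : Nat} (h1 : a ≤ c) (h2 : c ≤ a+t+1)
    (h3 : a+t ≤ c+u) (h4 : c+u = a+w) :
    max (pvIMax st a t) (pvIMax st c u) = pvIMax st a w := by
  apply le_antisymm
  · apply max_le
    · obtain ⟨j, hj, he⟩ := pvIMax_mem st a t
      rw [he]; exact pvG_le_pvIMax st a w j (by omega)
    · obtain ⟨j, hj, he⟩ := pvIMax_mem st c u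
      rw [he]
      have hidx : c + j = a + (c - a + j) := by omega
      rw [hidx]; exact pvG_le_pvIMax st a w _ (by omega)
  · obtain ⟨m, hm, he⟩ := pvIMax_mem st a w
    rw [he]
    by_cases hmt : m ≤ t
    · exact le_sup_of_le_left (pvG_le_pvIMax st a t m hmt)
    · have hidx : a + m = c + (m - (c - a)) := by omega
      rw [hidx]
      exact le_sup_of_le_right (pvG_le_pvIMax st c u _ (by omega))

-- A's inner loop, generalized over the remaining list and the live counter
lemma pvInner_aux (k : Int) (l : List Int) : ∀ c : Int, 1 ≤ c → c ≤ k →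
    (pvInner k l c = true ↔
      ((c.toNat ≤ l.length ∧ ∀ j, j < c.toNat → l.getD j 0 < 0) ∨
       ∃ i, i + k.toNat ≤ l.length ∧ ∀ j, j < k.toNat → l.getD (i+j) 0 < 0)) := by
  induction l with
  | nil =>
    intro c h1 h2
    simp only [pvInner, List.length_nil]
    constructor
    · intro h; exact absurd h (by simp)
    · rintro (⟨hle, _⟩ | ⟨i, hle, _⟩) <;> omega
  | cons s rest ih =>
    intro c h1 h2
    have hk1 : 1 ≤ k := le_trans h1 h2
    rw [show pvInner k (s :: rest) c =
        (if (if s < 0 then c - 1 else k) ≤ 0 then true else pvInner k rest (if s < 0 then c - 1 else k)) from rfl]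
    by_cases hs : s < 0
    · rw [if_pos hs]
      by_cases hc : c - 1 ≤ 0
      · rw [if_pos hc]
        simp only [true_iff]
        left
        refine ⟨by simp only [List.length_cons]; omega, ?_⟩
        intro j hj
        have hj0 : j = 0 := by omega
        subst hj0; simpa using hs
      · rw [if_neg hc, ih (c-1) (by omega) (by omega)]
        constructor
        · rintro (⟨hlen, hall⟩ | ⟨i, hlen, hall⟩)
          · left
            refine ⟨by simp only [List.length_cons] at hlen ⊢; omega, ?_⟩
            intro j hj
            match j with
            | 0 => simpa using hs
            | j'+1 =>
              rw [List.getD_cons_succ]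
              exact hall j' (by omega)
          · right
            refine ⟨i+1, by simp only [List.length_cons] at hlen ⊢; omega, ?_⟩
            intro j hj
            rw [show i+1+j = (i+j)+1 by omega, List.getD_cons_succ]
            exact hall j hj
        · rintro (⟨hlen, hall⟩ | ⟨i, hlen, hall⟩)
          · left
            refine ⟨by simp only [List.length_cons] at hlen ⊢; omega, ?_⟩
            intro j hj
            have := hall (j+1) (by omega)
            rwa [List.getD_cons_succ] at this
          · match i with
            | 0 =>
              left
              refine ⟨by simp only [List.length_cons] at hlen ⊢; omega, ?_⟩
              intro j hj
              have := hall (j+1) (by omega)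
              rwa [show (0:Nat)+(j+1) = j+1 by omega, List.getD_cons_succ] at this
            | i'+1 =>
              right
              refine ⟨i', by simp only [List.length_cons] at hlen ⊢; omega, ?_⟩
              intro j hj
              have := hall j hj
              rwa [show i'+1+j = (i'+j)+1 by omega, List.getD_cons_succ] at this
    · rw [if_neg hs, if_neg (by omega), ih k (by omega) le_rfl]
      have hs' : ¬ s < 0 := hs
      constructor
      · rintro (⟨hlen, hall⟩ | ⟨i, hlen, hall⟩)
        · right
          refine ⟨1, by simp only [List.length_cons] at hlen ⊢; omega, ?_⟩
          intro j hj
          rw [show (1:Nat)+j = j+1 by omega, List.getD_cons_succ]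
          exact hall j (by omega)
        · right
          refine ⟨i+1, by simp only [List.length_cons] at hlen ⊢; omega, ?_⟩
          intro j hj
          rw [show i+1+j = (i+j)+1 by omega, List.getD_cons_succ]
          exact hall j hj
      · rintro (⟨hlen, hall⟩ | ⟨i, hlen, hall⟩)
        · exact absurd (by simpa using hall 0 (by omega)) hs'
        · match i with
          | 0 => exact absurd (by simpa using hall 0 (by omega)) hs'
          | i'+1 =>
            right
            refine ⟨i', by simp only [List.length_cons] at hlen ⊢; omega, ?_⟩
            intro j hj
            have := hall j hj
            rwa [show i'+1+j = (i'+j)+1 by omega, List.getD_cons_succ] at this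

lemma pvInner_iff (st : List Int) (k x : Int) (hk : 1 ≤ k) :
    (pvInner k (st.map (fun i => i - x)) k = true ↔ pvBig st k.toNat x) := by
  have hmap : ∀ j, j < st.length → (st.map (fun i => i - x)).getD j 0 = pvG st j - x := by
    intro j hj
    rw [List.getD_eq_getElem _ _ (by simpa using hj), List.getElem_map,
        pvG, List.getD_eq_getElem _ _ hj]
  rw [pvInner_aux k _ k hk le_rfl]
  constructor
  · rintro (⟨hlen, hall⟩ | ⟨i, hlen, hall⟩)
    · refine ⟨0, by simpa using hlen, ?_⟩
      intro j hj
      have := hall j hj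
      rw [hmap j (by simp at hlen; omega)] at this
      simp only [Nat.zero_add]
      omega
    · refine ⟨i, by simpa using hlen, ?_⟩
      intro j hj
      have := hall j hj
      rw [hmap (i+j) (by simp at hlen; omega)] at this
      omega
  · rintro ⟨i, hlen, hall⟩
    right
    refine ⟨i, by simpa using hlen, ?_⟩
    intro j hj
    rw [hmap (i+j) (by omega)]
    have := hall j hj
    omega

lemma pvSearch_exit (st : List Int) (k a b : Int) (h : ¬ a ≤ b) :
    pvSearch st k a b = PySem.Int.floordiv (a+b) 2 := by
  rw [pvSearch, dif_neg h]

-- the binary search lands on the unique boundary of the monotone predicate pvBig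
lemma pvSearch_spec (st : List Int) (k : Int) (hk : 1 ≤ k) :
    ∀ (N : Nat) (a b : Int), (b - a + 1).toNat ≤ N → a ≤ b + 1 →
      ¬ pvBig st k.toNat (a - 1) → pvBig st k.toNat (b + 1) →
      ¬ pvBig st k.toNat (pvSearch st k a b) ∧ pvBig st k.toNat (pvSearch st k a b + 1) := by
  intro N
  induction N with
  | zero =>
    intro a b hN hab h1 h2
    have hb : b = a - 1 := by omega
    rw [pvSearch_exit st k a b (by omega)]
    have hdiv : PySem.Int.floordiv (a + b) 2 = b := by
      rw [PySem.Int.floordiv_eq_ediv_of_pos (by norm_num)]; omega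
    rw [hdiv]
    exact ⟨by rwa [hb], h2⟩
  | succ N ih =>
    intro a b hN hab h1 h2
    by_cases hle : a ≤ b
    · have hmid := PySem.Int.floordiv_two_mid_bounds hle
      rw [pvSearch, dif_pos hle]
      by_cases hbig : pvInner k (st.map (fun i => i - PySem.Int.floordiv (a + b) 2)) k = true
      · rw [if_pos hbig]
        refine ih a (PySem.Int.floordiv (a + b) 2 - 1) (by omega) (by omega) h1 ?_
        have := (pvInner_iff st k (PySem.Int.floordiv (a + b) 2) hk).1 hbig
        rwa [show PySem.Int.floordiv (a + b) 2 - 1 + 1 = PySem.Int.floordiv (a + b) 2 by omega]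
      · rw [if_neg hbig]
        refine ih (PySem.Int.floordiv (a + b) 2 + 1) b (by omega) (by omega) ?_ h2
        rw [show PySem.Int.floordiv (a + b) 2 + 1 - 1 = PySem.Int.floordiv (a + b) 2 by omega]
        intro hbb
        exact hbig ((pvInner_iff st k (PySem.Int.floordiv (a + b) 2) hk).2 hbb)
    · have hb : b = a - 1 := by omega
      rw [pvSearch_exit st k a b hle]
      have hdiv : PySem.Int.floordiv (a + b) 2 = b := by
        rw [PySem.Int.floordiv_eq_ediv_of_pos (by norm_num)]; omega
      rw [hdiv]
      exact ⟨by rwa [hb], h2⟩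

lemma pvG_mem (st : List Int) (j : Nat) (h : j < st.length) : pvG st j ∈ st := by
  rw [pvG, List.getD_eq_getElem _ _ h]
  exact List.getElem_mem h

-- ---- B side ----

-- what B's pre-array holds at index j: the block maximum from j's k-block start up to j
def pvPB (st : List Int) (K j : Nat) : Int := pvIMax st (j - j % K) (j % K)
-- what B's suf-array holds at index j: the maximum from j to the end of j's k-block (clipped)
def pvSB (st : List Int) (K j : Nat) : Int :=
  pvIMax st j (min (j - j % K + K - 1) (st.length - 1) - j)

lemma mod_pred {K j : Nat} (hK : 0 < K) (h : j % K ≠ 0) : (j-1) % K = j % K - 1 := by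
  have h1 := Nat.div_add_mod j K
  have h2 := Nat.mod_lt j hK
  have h3 : j - 1 = K * (j / K) + (j % K - 1) := by omega
  rw [h3, Nat.mul_add_mod]
  exact Nat.mod_eq_of_lt (by omega)

lemma mod_succ {K j : Nat} (hK : 0 < K) (h : j % K ≠ K - 1) : (j+1) % K = j % K + 1 := by
  have h1 := Nat.div_add_mod j K
  have h2 := Nat.mod_lt j hK
  have h3 : j + 1 = K * (j / K) + (j % K + 1) := by omega
  rw [h3, Nat.mul_add_mod]
  exact Nat.mod_eq_of_lt (by omega)

lemma mod_add_km1 {K it : Nat} (hK : 0 < K) :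
    (it + K - 1) % K = if it % K = 0 then K - 1 else it % K - 1 := by
  have h1 := Nat.div_add_mod it K
  have h2 := Nat.mod_lt it hK
  by_cases h : it % K = 0
  · rw [if_pos h]
    have h3 : it + K - 1 = K * (it / K) + (K - 1) := by omega
    rw [h3, Nat.mul_add_mod]
    exact Nat.mod_eq_of_lt (by omega)
  · rw [if_neg h]
    have h3 : it + K - 1 = K * (it / K + 1) + (it % K - 1) := by
      rw [Nat.mul_add, Nat.mul_one]; omega
    rw [h3, Nat.mul_add_mod]
    exact Nat.mod_eq_of_lt (by omega)

lemma pre_build (st : List Int) (k : Int) (hk : 1 ≤ k) :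
    ∀ j, j ≤ st.length →
    ((PySem.List.enumerate (st.take j) 0).foldl
      (fun acc js =>
        acc ++ [if PySem.Int.mod js.1 k == 0 then js.2
                else max (PySem.List.pyGetD acc (-1) 0) js.2]) []) =
      (List.range j).map (pvPB st k.toNat) := by
  have hkK : ((k.toNat : Int)) = k := Int.toNat_of_nonneg (by omega)
  have hK : 0 < k.toNat := by omega
  intro j
  induction j with
  | zero => intro _; rfl
  | succ j ihj =>
    intro hj
    have hjl : j < st.length := by omega
    rw [List.take_add_one, List.getElem?_eq_getElem hjl]
    simp only [Option.toList_some]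
    rw [PySem.List.enumerate_append, List.foldl_append, ihj (by omega)]
    rw [List.length_take]
    rw [show ((0:Int) + ((min j st.length : Nat) : Int)) = ((j:Nat):Int) by omega]
    rw [PySem.List.enumerate_cons, PySem.List.enumerate_nil]
    rw [List.foldl_cons, List.foldl_nil]
    rw [List.range_succ, List.map_append, List.map_singleton]
    congr 1
    have hmodj : PySem.Int.mod ((j:Nat):Int) k = ((j % k.toNat : Nat) : Int) := by
      conv_lhs => rw [← hkK]
      exact PySem.Int.mod_natCast j k.toNat
    rw [hmodj]
    by_cases hr : j % k.toNat = 0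
    · rw [if_pos (by rw [beq_iff_eq]; exact Nat.cast_eq_zero.2 hr)]
      show [st[j]] = [pvPB st k.toNat j]
      rw [pvPB, hr, Nat.sub_zero]
      rw [show pvIMax st j 0 = pvG st j from rfl, pvG, List.getD_eq_getElem _ _ hjl]
    · rw [if_neg (by rw [beq_iff_eq]; exact fun h => hr (Nat.cast_eq_zero.1 h))]
      have hj0 : 1 ≤ j := by
        rcases Nat.eq_zero_or_pos j with h0 | h0
        · subst h0; simp at hr
        · exact h0
      have hsplit : (List.range j).map (pvPB st k.toNat) =
          (List.range (j-1)).map (pvPB st k.toNat) ++ [pvPB st k.toNat (j-1)] := by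
        conv_lhs => rw [show j = (j-1)+1 by omega]
        rw [List.range_succ, List.map_append, List.map_singleton]
      rw [hsplit, PySem.List.pyGetD_neg_one_append_singleton]
      have hr' := Nat.mod_lt j hK
      have hrle : j % k.toNat ≤ j := Nat.mod_le j _
      have hpred := mod_pred hK hr
      show [max (pvPB st k.toNat (j-1)) st[j]] = [pvPB st k.toNat j]
      have hgoal : max (pvPB st k.toNat (j-1)) st[j] = pvPB st k.toNat j := by
        rw [pvPB, pvPB, hpred]
        rw [pvIMax_pos st (j - j % k.toNat) (j % k.toNat) (by omega)]
        rw [show j - 1 - (j % k.toNat - 1) = j - j % k.toNat by omega]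
        rw [show j - j % k.toNat + j % k.toNat = j by omega]
        rw [pvG, List.getD_eq_getElem _ _ hjl]
      rw [hgoal]

lemma suf_inv (st : List Int) (k : Int) (hk1 : 1 ≤ k) :
    ∀ (N : Nat) (a : Int) (acc : List Int), (a + 1).toNat ≤ N → a < (st.length : Int) →
      acc.length = st.length →
      (∀ t : Nat, a < (t:Int) → t < st.length → acc.getD t 0 = pvSB st k.toNat t) →
      ∀ t : Nat, t < st.length →
        (((PySem.List.pyRange a (-1) (-1)).foldl
            (fun acc j =>
              PySem.List.pySetD acc j
                (if PySem.Int.mod j k == k - 1 || j == (st.length : Int) - 1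
                 then PySem.List.pyGetD st j 0
                 else max (PySem.List.pyGetD acc (j + 1) 0) (PySem.List.pyGetD st j 0)))
            acc).getD t 0 = pvSB st k.toNat t) := by
  have hkK : ((k.toNat : Int)) = k := Int.toNat_of_nonneg (by omega)
  have hK : 0 < k.toNat := by omega
  intro N
  induction N with
  | zero =>
    intro a acc hN ha hlen hinv t ht
    rw [PySem.List.pyRange_neg_one_eq_nil (by omega)]
    exact hinv t (by omega) ht
  | succ N ih =>
    intro a acc hN ha hlen hinv t ht
    by_cases ha0 : a < 0
    · rw [PySem.List.pyRange_neg_one_eq_nil (by omega)]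
      exact hinv t (by omega) ht
    · rw [PySem.List.pyRange_neg_one_cons (by omega : (-1:Int) < a), List.foldl_cons]
      have haat : a = ((a.toNat : Nat) : Int) := by omega
      have hatlen : a.toNat < st.length := by omega
      refine ih (a-1) _ (by omega) (by omega)
        (by rw [PySem.List.length_pySetD]; exact hlen) ?_ t ht
      intro t2 ht2 htl2
      rw [← PySem.List.pyGetD_natCast]
      rw [haat, PySem.List.pyGetD_pySetD_natCast acc a.toNat t2 _ 0 (by omega)]
      by_cases hte : t2 = a.toNat
      · rw [if_pos hte, ← hte]
        have hr := Nat.mod_lt t2 hK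
        have hrle : t2 % k.toNat ≤ t2 := Nat.mod_le t2 _
        have hmodt : PySem.Int.mod ((t2:Nat):Int) k = ((t2 % k.toNat : Nat) : Int) := by
          conv_lhs => rw [← hkK]
          exact PySem.Int.mod_natCast t2 k.toNat
        rw [hmodt]
        have hcond : ((((t2 % k.toNat : Nat) : Int) == k - 1 || ((t2:Nat):Int) == (st.length:Int) - 1) = true)
            ↔ (t2 % k.toNat = k.toNat - 1 ∨ t2 = st.length - 1) := by
          simp only [Bool.or_eq_true, beq_iff_eq]
          omega
        by_cases hc : t2 % k.toNat = k.toNat - 1 ∨ t2 = st.length - 1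
        · rw [if_pos (hcond.2 hc)]
          rw [pvSB]
          have hmin0 : min (t2 - t2 % k.toNat + k.toNat - 1) (st.length - 1) - t2 = 0 := by
            rcases hc with h | h <;> omega
          rw [hmin0]
          have h0 : pvIMax st t2 0 = pvG st t2 := rfl
          rw [h0, PySem.List.pyGetD_natCast, pvG]
        · rw [if_neg (fun hx => hc (hcond.1 hx))]
          rw [not_or] at hc
          obtain ⟨hc1, hc2⟩ := hc
          have hnext : PySem.List.pyGetD acc (((t2:Nat):Int) + 1) 0 = pvSB st k.toNat (t2+1) := by
            rw [show (((t2:Nat):Int) + 1) = ((t2+1 : Nat) : Int) by omega, PySem.List.pyGetD_natCast]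
            exact hinv (t2+1) (by omega) (by omega)
          rw [hnext]
          have hsucc := mod_succ hK hc1
          rw [pvSB, pvSB, hsucc]
          have hbe : min (t2 + 1 - (t2 % k.toNat + 1) + k.toNat - 1) (st.length - 1) =
              min (t2 - t2 % k.toNat + k.toNat - 1) (st.length - 1) := by
            congr 1
            omega
          rw [hbe]
          have hbege : t2 + 1 ≤ min (t2 - t2 % k.toNat + k.toNat - 1) (st.length - 1) := by
            have : t2 % k.toNat + 1 < k.toNat := by omega
            omega
          rw [show min (t2 - t2 % k.toNat + k.toNat - 1) (st.length - 1) - t2 =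
              (min (t2 - t2 % k.toNat + k.toNat - 1) (st.length - 1) - (t2+1)) + 1 by omega]
          rw [pvIMax_cons]
          rw [max_comm]
          congr 1
          rw [PySem.List.pyGetD_natCast, pvG]
      · rw [if_neg hte]
        rw [PySem.List.pyGetD_natCast]
        exact hinv t2 (by omega) htl2

-- window maximum from the two block maxima
lemma window_max (st : List Int) (K it : Nat) (hK : 0 < K) (hit : it + K ≤ st.length) :
    max (pvSB st K it) (pvPB st K (it + K - 1)) = pvIMax st it (K-1) := by
  have hr := Nat.mod_lt it hK
  have hrle : it % K ≤ it := Nat.mod_le it _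
  have hmod := mod_add_km1 (it := it) hK
  rw [pvSB, pvPB, hmod]
  by_cases h : it % K = 0
  · rw [if_pos h]
    rw [show it + K - 1 - (K - 1) = it by omega]
    apply pvIMax_union st (a := it) (c := it)
    · omega
    · omega
    · have : min (it - it % K + K - 1) (st.length - 1) ≤ it + K - 1 := by omega
      omega
    · omega
  · rw [if_neg h]
    rw [show it + K - 1 - (it % K - 1) = it + K - it % K by omega]
    apply pvIMax_union st (a := it) (c := it + K - it % K)
    · omega
    · have : it - it % K + K - 1 + 1 = it + K - it % K := by omega
      omega
    · have : min (it - it % K + K - 1) (st.length - 1) ≤ it - it % K + K - 1 := by omega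
      omega
    · omega

-- B's best value in the main branch (proof-side name for the port's expression)
def pvBestVal (stones : List Int) (k : Int) : Int :=
  let n : Int := stones.length
  let pre := (PySem.List.enumerate stones 0).foldl
    (fun acc js =>
      acc ++ [if PySem.Int.mod js.1 k == 0 then js.2
              else max (PySem.List.pyGetD acc (-1) 0) js.2]) []
  let suf := (PySem.List.pyRange (n - 1) (-1) (-1)).foldl
    (fun acc j =>
      let s := PySem.List.pyGetD stones j 0
      PySem.List.pySetD acc j
        (if PySem.Int.mod j k == k - 1 || j == n - 1 then s
         else max (PySem.List.pyGetD acc (j + 1) 0) s))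
    (List.replicate stones.length 0)
  ((PySem.List.min? ((PySem.List.pyRange 0 (n - k + 1) 1).map
      (fun i => max (PySem.List.pyGetD suf i 0) (PySem.List.pyGetD pre (i + k - 1) 0)))
      (fun y => y)).getD 0)

-- B's best value is the exact threshold of pvBig
lemma pvBestVal_iff (st : List Int) (k : Int) (hne : st ≠ []) (hk1 : 1 ≤ k)
    (hkn : k ≤ (st.length : Int)) :
    ∀ x : Int, pvBig st k.toNat x ↔ pvBestVal st k < x := by
  have hkK : ((k.toNat : Int)) = k := Int.toNat_of_nonneg (by omega)
  have hK : 0 < k.toNat := by omega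
  have hlen1 : 1 ≤ st.length := List.length_pos_iff.2 hne
  have hKn : k.toNat ≤ st.length := by omega
  simp only [pvBestVal]
  have hpre : ((PySem.List.enumerate st 0).foldl
      (fun acc js =>
        acc ++ [if PySem.Int.mod js.1 k == 0 then js.2
                else max (PySem.List.pyGetD acc (-1) 0) js.2]) []) =
      (List.range st.length).map (pvPB st k.toNat) := by
    have := pre_build st k hk1 st.length le_rfl
    rwa [List.take_length] at this
  rw [hpre]
  have hsuf := suf_inv st k hk1 st.length ((st.length : Int) - 1) (List.replicate st.length 0)
    (by omega) (by omega) (by simp)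
    (by intro t ht htl; omega)
  rw [show ((st.length : Int) - k + 1) = (((st.length - k.toNat + 1 : Nat)) : Int) by omega]
  set W := st.length - k.toNat + 1 with hWdef
  have hW1 : 1 ≤ W := by omega
  set suf := (PySem.List.pyRange ((st.length : Int) - 1) (-1) (-1)).foldl
      (fun acc j =>
        PySem.List.pySetD acc j
          (if PySem.Int.mod j k == k - 1 || j == (st.length : Int) - 1
           then PySem.List.pyGetD st j 0
           else max (PySem.List.pyGetD acc (j + 1) 0) (PySem.List.pyGetD st j 0)))
      (List.replicate st.length 0) with hsufdef
  have hfval : ∀ x ∈ PySem.List.pyRange 0 ((W:Nat):Int) 1,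
      (max (PySem.List.pyGetD suf x 0)
           (PySem.List.pyGetD ((List.range st.length).map (pvPB st k.toNat)) (x + k - 1) 0))
        = pvIMax st x.toNat (k.toNat-1) := by
    intro x hx
    rw [PySem.List.mem_pyRange_one] at hx
    have hxW : x.toNat < W := by omega
    have hx0 : x = ((x.toNat : Nat) : Int) := by omega
    rw [hx0]
    rw [PySem.List.pyGetD_natCast]
    rw [show (((x.toNat:Nat):Int) + k - 1) = ((x.toNat + k.toNat - 1 : Nat) : Int) by omega,
        PySem.List.pyGetD_natCast]
    rw [PySem.List.getD_map_range _ _ _ _ (by omega)]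
    rw [hsuf x.toNat (by omega)]
    exact window_max st k.toNat x.toNat hK (by omega)
  set lst := (PySem.List.pyRange 0 ((W:Nat):Int) 1).map
      (fun i => max (PySem.List.pyGetD suf i 0)
        (PySem.List.pyGetD ((List.range st.length).map (pvPB st k.toNat)) (i + k - 1) 0)) with hlst
  have hlstne : lst ≠ [] := by
    rw [hlst]
    intro h
    have h0 : (0:Int) ∈ PySem.List.pyRange 0 ((W:Nat):Int) 1 := by
      rw [PySem.List.mem_pyRange_one]; omega
    rw [List.map_eq_nil_iff] at h
    rw [h] at h0
    exact absurd h0 (List.not_mem_nil)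
  obtain ⟨m, hm⟩ : ∃ m, PySem.List.min? lst (fun y => y) = some m := by
    cases h : PySem.List.min? lst (fun y => y) with
    | none => exact absurd ((PySem.List.min?_eq_none_iff lst _).1 h) hlstne
    | some m => exact ⟨m, rfl⟩
  rw [hm]
  simp only [Option.getD_some]
  have hmmem := PySem.List.min?_mem hm
  have hmmin : ∀ y ∈ lst, m ≤ y := PySem.List.min?_isMin hm
  obtain ⟨x0, hx0mem, hx0eq⟩ := List.mem_map.1 hmmem
  have hx0win := hfval x0 hx0mem
  rw [PySem.List.mem_pyRange_one] at hx0mem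
  intro x
  constructor
  · rintro ⟨i, hiK, hall⟩
    have hiW : i < W := by omega
    have himem : ((i : Nat) : Int) ∈ PySem.List.pyRange 0 ((W:Nat):Int) 1 := by
      rw [PySem.List.mem_pyRange_one]; omega
    have hile := hmmin _ (List.mem_map_of_mem himem)
    rw [hfval _ himem] at hile
    rw [Int.toNat_natCast] at hile
    obtain ⟨j0, hj0, hj0eq⟩ := pvIMax_mem st i (k.toNat-1)
    rw [hj0eq] at hile
    have := hall j0 (by omega)
    omega
  · intro hmx
    refine ⟨x0.toNat, by omega, ?_⟩
    intro j hj
    have hle : pvG st (x0.toNat + j) ≤ pvIMax st x0.toNat (k.toNat-1) :=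
      pvG_le_pvIMax st x0.toNat (k.toNat-1) j (by omega)
    rw [hx0win] at hx0eq
    omega

-- with k ≤ 0 the chance counter is exhausted at the first stone: the inner loop always reports big
lemma pvInner_nonpos (st : List Int) (k x : Int) (hk : k ≤ 0) (hne : st ≠ []) :
    pvInner k (st.map (fun i => i - x)) k = true := by
  cases st with
  | nil => exact absurd rfl hne
  | cons s t =>
    rw [List.map_cons]
    rw [show pvInner k ((s - x) :: t.map (fun i => i - x)) k =
        (if (if s - x < 0 then k - 1 else k) ≤ 0 then true
         else pvInner k (t.map (fun i => i - x)) (if s - x < 0 then k - 1 else k)) from rfl]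
    rw [if_pos (by split_ifs <;> omega)]

-- if every probed level reports big, the search collapses to start - 1
lemma pvSearch_allbig (st : List Int) (k : Int) :
    ∀ (N : Nat) (a b : Int), (b - a + 1).toNat ≤ N → a ≤ b + 1 →
      (∀ mid, a ≤ mid → mid ≤ b → pvInner k (st.map (fun i => i - mid)) k = true) →
      pvSearch st k a b = a - 1 := by
  intro N
  induction N with
  | zero =>
    intro a b hN hab hall
    rw [pvSearch_exit st k a b (by omega)]
    rw [PySem.Int.floordiv_eq_ediv_of_pos (by norm_num)]
    omega
  | succ N ih =>
    intro a b hN hab hall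
    by_cases hle : a ≤ b
    · have hmid := PySem.Int.floordiv_two_mid_bounds hle
      rw [pvSearch, dif_pos hle]
      rw [if_pos (hall _ (by omega) (by omega))]
      exact ih a (PySem.Int.floordiv (a + b) 2 - 1) (by omega) (by omega)
        (fun mid h1 h2 => hall mid h1 (by omega))
    · rw [pvSearch_exit st k a b hle]
      rw [PySem.Int.floordiv_eq_ediv_of_pos (by norm_num)]
      omega
-- if no probed level reports big, the search climbs to the top
lemma pvSearch_allsmall (st : List Int) (k : Int) :
    ∀ (N : Nat) (a b : Int), (b - a + 1).toNat ≤ N → a ≤ b + 1 →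
      (∀ mid, a ≤ mid → mid ≤ b → ¬ (pvInner k (st.map (fun i => i - mid)) k = true)) →
      pvSearch st k a b = b := by
  intro N
  induction N with
  | zero =>
    intro a b hN hab hall
    rw [pvSearch_exit st k a b (by omega)]
    rw [PySem.Int.floordiv_eq_ediv_of_pos (by norm_num)]
    omega
  | succ N ih =>
    intro a b hN hab hall
    by_cases hle : a ≤ b
    · have hmid := PySem.Int.floordiv_two_mid_bounds hle
      rw [pvSearch, dif_pos hle]
      rw [if_neg (hall _ (by omega) (by omega))]
      exact ih (PySem.Int.floordiv (a + b) 2 + 1) b (by omega) (by omega)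
        (fun mid h1 h2 => hall mid (by omega) h2)
    · rw [pvSearch_exit st k a b hle]
      rw [PySem.Int.floordiv_eq_ediv_of_pos (by norm_num)]
      omega

-- A with a negative maximum: the while loop never runs
lemma solution_neg (st : List Int) (k m : Int) (hm : PySem.List.max? st (fun y => y) = some m)
    (hmneg : m < 0) : solution st k = PySem.Int.floordiv m 2 := by
  unfold solution
  rw [hm]
  simp only [Option.getD_some]
  rw [pvSearch_exit st k 0 m (by omega)]
  rw [show (0:Int) + m = m by omega]

-- the port of B, with max(stones) evaluated
lemma solution_alt_cases (st : List Int) (k m : Int)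
    (hm : PySem.List.max? st (fun y => y) = some m) :
    solution_alt st k =
      (if k ≤ 0 then (-1:Int) else if k > (st.length : Int) then m
       else max (-1) (pvBestVal st k)) := by
  simp only [solution_alt, pvBestVal, hm, Option.getD_some]

-- A = B outside D_
lemma main_eq (st : List Int) (k : Int) (hne : st ≠ []) (hnd : ¬ D_solution st k) :
    solution st k = solution_alt st k := by
  obtain ⟨m, hm⟩ : ∃ m, PySem.List.max? st (fun y => y) = some m := by
    cases h : PySem.List.max? st (fun y => y) with
    | none => exact absurd ((PySem.List.max?_eq_none_iff st _).1 h) hne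
    | some m => exact ⟨m, rfl⟩
  have hmax : ∀ y ∈ st, y ≤ m := PySem.List.max?_isMax hm
  have hmem : m ∈ st := PySem.List.max?_mem hm
  have hlen1 : 1 ≤ st.length := List.length_pos_iff.2 hne
  rw [solution_alt_cases st k m hm]
  -- from ¬ D_: m ≥ -2, and if k > length then m ≥ -1
  have hm2 : -2 ≤ m := by
    by_contra hc
    exact hnd ⟨hne, Or.inl (fun s hs => by have := hmax s hs; omega)⟩
  have hm1 : k > (st.length : Int) → -1 ≤ m := by
    intro hkn
    by_contra hc
    have hmeq : m = -2 := by omega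
    exact hnd ⟨hne, Or.inr ⟨fun s hs => by have := hmax s hs; omega, hmeq ▸ hmem, hkn⟩⟩
  by_cases hk0 : k ≤ 0
  · rw [if_pos hk0]
    by_cases hmn : m < 0
    · rw [solution_neg st k m hm hmn]
      rw [PySem.Int.floordiv_eq_ediv_of_pos (by norm_num)]
      omega
    · unfold solution
      rw [hm]
      simp only [Option.getD_some]
      rw [pvSearch_allbig st k (m - 0 + 1).toNat 0 m le_rfl (by omega)
        (fun mid _ _ => pvInner_nonpos st k mid hk0 hne)]
      omega
  · rw [if_neg hk0]
    have hk1 : 1 ≤ k := by omega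
    by_cases hkn : k > (st.length : Int)
    · rw [if_pos hkn]
      have hm1' := hm1 hkn
      by_cases hmn : m < 0
      · rw [solution_neg st k m hm hmn]
        rw [PySem.Int.floordiv_eq_ediv_of_pos (by norm_num)]
        omega
      · unfold solution
        rw [hm]
        simp only [Option.getD_some]
        rw [pvSearch_allsmall st k (m - 0 + 1).toNat 0 m le_rfl (by omega) ?_]
        intro mid _ _ hbig
        obtain ⟨i, hiK, _⟩ := (pvInner_iff st k mid hk1).1 hbig
        omega
    · rw [if_neg hkn]
      have hbig := pvBestVal_iff st k hne hk1 (by omega)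
      have hBigTop : pvBig st k.toNat (m + 1) := by
        refine ⟨0, by omega, ?_⟩
        intro j hj
        have : pvG st (0+j) ≤ m := hmax _ (pvG_mem st (0+j) (by omega))
        omega
      have hbestle : pvBestVal st k ≤ m := by
        have := (hbig (m+1)).1 hBigTop
        omega
      by_cases hmn : m < 0
      · rw [solution_neg st k m hm hmn]
        rw [PySem.Int.floordiv_eq_ediv_of_pos (by norm_num)]
        have : max (-1) (pvBestVal st k) = -1 := by omega
        rw [this]
        omega
      · by_cases hbneg : pvBestVal st k < 0
        · unfold solution
          rw [hm]
          simp only [Option.getD_some]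
          rw [pvSearch_allbig st k (m - 0 + 1).toNat 0 m le_rfl (by omega) ?_]
          · omega
          · intro mid h1 h2
            rw [pvInner_iff st k mid hk1]
            rw [hbig mid]
            omega
        · unfold solution
          rw [hm]
          simp only [Option.getD_some]
          have hspec := pvSearch_spec st k hk1 (m - 0 + 1).toNat 0 m le_rfl (by omega)
            (by rw [hbig]; omega) (by rw [hbig]; omega)
          rw [hbig] at hspec
          rw [hbig] at hspec
          omega

-- ===== VERDICT (by name: the statement is the Claim_ definition above) =====
theorem solution_spec : Claim_unchanged_solution := by
  intro stones k _ hPre hnd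
  exact main_eq stones k hPre hnd

theorem solution_changed : Claim_changed_solution := by
  have h1 : solution [-4] 1 = -2 := by
    have := solution_neg [-4] 1 (-4) rfl (by norm_num)
    rw [this]
    rfl
  unfold Claim_changed_solution
  exact ⟨by decide, by decide, by decide, h1, by decide, by decide⟩

theorem solution_tight : Claim_exact_solution := by
  intro stones k _ hPre hD
  obtain ⟨hne, hcase⟩ := hD
  obtain ⟨m, hm⟩ : ∃ m, PySem.List.max? stones (fun y => y) = some m := by
    cases h : PySem.List.max? stones (fun y => y) with
    | none => exact absurd ((PySem.List.max?_eq_none_iff stones _).1 h) hne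
    | some m => exact ⟨m, rfl⟩
  have hmax : ∀ y ∈ stones, y ≤ m := PySem.List.max?_isMax hm
  have hmem : m ∈ stones := PySem.List.max?_mem hm
  have hlen1 : 1 ≤ stones.length := List.length_pos_iff.2 hne
  have hmneg : m < 0 := by
    rcases hcase with h | ⟨h, _, _⟩
    · have := h m hmem; omega
    · have := h m hmem; omega
  rw [solution_neg stones k m hm hmneg, solution_alt_cases stones k m hm]
  rw [PySem.Int.floordiv_eq_ediv_of_pos (by norm_num)]
  rcases hcase with h3 | ⟨hle2, hmm2, hkn⟩
  · -- max ≤ -3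
    have hm3 : m ≤ -3 := h3 m hmem
    by_cases hk0 : k ≤ 0
    · rw [if_pos hk0]; omega
    · rw [if_neg hk0]
      by_cases hkn : k > (stones.length : Int)
      · rw [if_pos hkn]; omega
      · rw [if_neg hkn]
        have hbig := pvBestVal_iff stones k hne (by omega) (by omega)
        have hBigTop : pvBig stones k.toNat (m + 1) := by
          refine ⟨0, by omega, ?_⟩
          intro j hj
          have : pvG stones (0+j) ≤ m := hmax _ (pvG_mem stones (0+j) (by omega))
          omega
        have hbestle : pvBestVal stones k ≤ m := by
          have := (hbig (m+1)).1 hBigTop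
          omega
        have : max (-1) (pvBestVal stones k) = -1 := by omega
        rw [this]
        omega
  · -- max = -2 and k > length
    have hm2 : m = -2 := le_antisymm (hle2 m hmem) (hmax _ hmm2)
    rw [if_neg (by omega), if_pos hkn]
    omega
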